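-- pv_equiv track=rewrite | github.com/uhRandomTree/Terminaldle | TERMINALDLE.PY | DateFromWordleNum
-- ===== SOURCE A (Python) =====
-- def DateFromWordleNum(GameNumber):
-- 	MonthArray=[0,31,28,31,30,31,30,31,31,30,31,30,31,30,31]
-- 	Day=19
-- 	Month=6
-- 	Year=2021
-- 	while GameNumber>0:
-- 		Day+=1
-- 		if Day>MonthArray[Month]:
-- 			Day=1
-- 			Month+=1
-- 		if Month>12:
-- 			Month=1
-- 			Year+=1
-- 			MonthArray[2]=28
-- 			if Year%100==0:
-- 				if Year%400==0:MonthArray[2]=29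
-- 			else:
-- 				if Year%4==0:MonthArray[2]=29
-- 		GameNumber-=1
-- 	return f"{Year}-{Month:02d}-{Day:02d}"
-- ===== SOURCE B (Python) =====
-- def DateFromWordleNum(GameNumber):
-- 	# Month-granularity arithmetic: skip whole months by subtraction instead of
-- 	# simulating every single day.
-- 	def MonthLen(Year, Month):
-- 		if Month == 2:
-- 			return 29 if (Year % 4 == 0 and Year % 100 != 0) or Year % 400 == 0 else 28
-- 		return 31 if Month in (1, 3, 5, 7, 8, 10, 12) else 30
-- 	n = GameNumber if GameNumber > 0 else 0
-- 	if n <= 11:  # stays inside June 2021 (day 19 + up to 11 = 30)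
-- 		return f"2021-06-{19 + n:02d}"
-- 	n -= 12  # days remaining after landing on 2021-07-01
-- 	Year, Month = 2021, 7
-- 	while True:
-- 		L = MonthLen(Year, Month)
-- 		if n < L:
-- 			return f"{Year}-{Month:02d}-{n + 1:02d}"
-- 		n -= L
-- 		Month += 1
-- 		if Month > 12:
-- 			Month = 1
-- 			Year += 1
-- ===== Notes on version B (the rewrite author's own statement) =====
-- stated objective: faster
-- what changed: B replaces A's day-by-day simulation with a mutable month-length table by month-granularity arithmetic: it subtracts whole month lengths (computed by formula) until fewer than a month's days remain, so it does ~30x fewer loop iterations.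
import Mathlib
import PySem

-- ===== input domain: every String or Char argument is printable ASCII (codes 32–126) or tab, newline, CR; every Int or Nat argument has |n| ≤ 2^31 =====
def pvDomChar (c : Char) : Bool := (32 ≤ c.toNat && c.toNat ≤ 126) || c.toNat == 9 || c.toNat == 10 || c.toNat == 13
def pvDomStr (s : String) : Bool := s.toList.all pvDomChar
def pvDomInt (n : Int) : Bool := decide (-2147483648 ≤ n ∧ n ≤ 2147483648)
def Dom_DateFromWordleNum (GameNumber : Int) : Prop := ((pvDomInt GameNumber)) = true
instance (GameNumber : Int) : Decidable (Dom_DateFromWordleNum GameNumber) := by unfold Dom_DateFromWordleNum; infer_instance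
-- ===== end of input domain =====

-- B replaces A's day-by-day simulation with month-granularity subtraction (skips whole months); same return value, large constant-factor speedup.

-- f"{n:02d}" for the values that occur here (0 ≤ n): zero-pad to width 2
def pvPad2 (n : Int) : List Char :=
  let s := PySem.Int.toChars n
  if s.length < 2 then '0' :: s else s

-- f"{Year}-{Month:02d}-{Day:02d}" (shared by both ports: both Pythons use this very f-string)
def pvFmt (y m d : Int) : String :=
  String.ofList (PySem.Int.toChars y ++ '-' :: pvPad2 m ++ '-' :: pvPad2 d)

-- ===== PORT A =====
-- MonthArray[2]=28; if Year%100==0: if Year%400==0: 29  else: if Year%4==0: 29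
def pvSetFeb (arr : List Int) (y : Int) : List Int :=
  let a := PySem.List.pySetD arr 2 28
  if PySem.Int.mod y 100 = 0 then
    (if PySem.Int.mod y 400 = 0 then PySem.List.pySetD a 2 29 else a)
  else
    (if PySem.Int.mod y 4 = 0 then PySem.List.pySetD a 2 29 else a)

-- the while-loop of A; fuel = number of remaining iterations (GameNumber counts down by 1)
def pvLoopA : Nat → List Int → Int → Int → Int → (List Int × Int × Int × Int)
  | 0, arr, d, m, y => (arr, d, m, y)
  | k + 1, arr, d, m, y =>
    let d1 := d + 1
    -- if Day>MonthArray[Month]: Day=1; Month+=1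
    let dm : Int × Int := if d1 > PySem.List.pyGetD arr m 0 then (1, m + 1) else (d1, m)
    -- if Month>12: Month=1; Year+=1; MonthArray[2]=…
    let st : List Int × Int × Int :=
      if dm.2 > 12 then (pvSetFeb arr (y + 1), 1, y + 1) else (arr, dm.2, y)
    pvLoopA k st.1 dm.1 st.2.1 st.2.2

def DateFromWordleNum (GameNumber : Int) : String :=
  let s := pvLoopA GameNumber.toNat [0,31,28,31,30,31,30,31,31,30,31,30,31,30,31] 19 6 2021
  pvFmt s.2.2.2 s.2.2.1 s.2.1

-- ===== PORT B =====
def pvMonthLen (y m : Int) : Int :=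
  if m = 2 then
    (if (PySem.Int.mod y 4 = 0 ∧ PySem.Int.mod y 100 ≠ 0) ∨ PySem.Int.mod y 400 = 0 then 29 else 28)
  else
    (if m = 1 ∨ m = 3 ∨ m = 5 ∨ m = 7 ∨ m = 8 ∨ m = 10 ∨ m = 12 then 31 else 30)

theorem pvMonthLen_ge (y m : Int) : 28 ≤ pvMonthLen y m := by
  unfold pvMonthLen; split_ifs <;> omega

-- B's `while True` month loop; terminates because n drops by ≥ 28 each round
def pvLoopB (n y m : Int) : String :=
  let L := pvMonthLen y m
  if _h : n < L then pvFmt y m (n + 1)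
  else
    let n' := n - L
    let m' := m + 1
    if m' > 12 then pvLoopB n' (y + 1) 1 else pvLoopB n' y m'
termination_by n.toNat
decreasing_by
  all_goals
    have := pvMonthLen_ge y m
    omega

def DateFromWordleNum_alt (GameNumber : Int) : String :=
  let n := if GameNumber > 0 then GameNumber else 0
  if n ≤ 11 then pvFmt 2021 6 (19 + n)   -- stays inside June 2021
  else pvLoopB (n - 12) 2021 7           -- after landing on 2021-07-01

-- ===== PRECONDITION & SPEC =====
def Spec_DateFromWordleNum (GameNumber : Int) (out : String) : Prop := out = DateFromWordleNum_alt GameNumber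
instance (GameNumber : Int) (out : String) : Decidable (Spec_DateFromWordleNum GameNumber out) := by unfold Spec_DateFromWordleNum; infer_instance

-- ===== CLAIM (what is proved, stated in full; the proofs are below) =====
def Claim_equal_DateFromWordleNum : Prop := ∀ (GameNumber : Int), Dom_DateFromWordleNum GameNumber → Spec_DateFromWordleNum GameNumber (DateFromWordleNum GameNumber)

-- ===== LEMMAS AND PROOFS =====

-- A's month array with February length f
def MA (f : Int) : List Int := [0,31,f,31,30,31,30,31,31,30,31,30,31,30,31]

-- the February length A's year-roll installs for year y
def pvFeb (y : Int) : Int :=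
  if PySem.Int.mod y 100 = 0 then (if PySem.Int.mod y 400 = 0 then 29 else 28)
  else (if PySem.Int.mod y 4 = 0 then 29 else 28)

def pvFmtState (s : List Int × Int × Int × Int) : String := pvFmt s.2.2.2 s.2.2.1 s.2.1

theorem pvFeb_eq (y : Int) : pvFeb y = pvMonthLen y 2 := by
  have h4 := PySem.Int.mod_eq_emod_of_pos (a := y) (b := 4) (by norm_num)
  have h100 := PySem.Int.mod_eq_emod_of_pos (a := y) (b := 100) (by norm_num)
  have h400 := PySem.Int.mod_eq_emod_of_pos (a := y) (b := 400) (by norm_num)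
  unfold pvFeb pvMonthLen
  simp only [h4, h100, h400]
  split_ifs <;> first | rfl | omega

theorem pvSetFeb_MA (f y : Int) : pvSetFeb (MA f) y = MA (pvFeb y) := by
  unfold pvSetFeb pvFeb MA
  split_ifs <;> rfl

theorem pvMonthLen_eq (y m : Int) (h1 : 1 ≤ m) (h2 : m ≤ 12) :
    pvMonthLen y m = PySem.List.pyGetD (MA (pvFeb y)) m 0 := by
  interval_cases m
  · rfl
  · exact (pvFeb_eq y).symm
  all_goals rfl

theorem pvLoopA_add (a b : Nat) (arr : List Int) (d m y : Int) :
    pvLoopA (a + b) arr d m y =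
      (fun s => pvLoopA b s.1 s.2.1 s.2.2.1 s.2.2.2) (pvLoopA a arr d m y) := by
  induction a generalizing arr d m y with
  | zero => simp [pvLoopA]
  | succ a ih =>
    rw [Nat.succ_add]
    simp only [pvLoopA]
    exact ih _ _ _ _

theorem pvLoopA_stay (f y m : Int) (hm : m ≤ 12) :
    ∀ (k : Nat) (d : Int), d + k ≤ PySem.List.pyGetD (MA f) m 0 →
      pvLoopA k (MA f) d m y = (MA f, d + k, m, y) := by
  intro k
  induction k with
  | zero => intro d _; simp [pvLoopA]
  | succ k ih =>
    intro d hd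
    have h1 : ¬ d + 1 > PySem.List.pyGetD (MA f) m 0 := by push_cast at hd; omega
    simp only [pvLoopA, if_neg h1]
    have h2 : ¬ m > 12 := by omega
    simp only [if_neg h2]
    rw [ih (d + 1) (by push_cast at hd ⊢; omega)]
    have : d + 1 + (k : Int) = d + ((k + 1 : Nat) : Int) := by push_cast; ring
    rw [this]

theorem pvLoopA_cross (f y m : Int) (hm : m ≤ 12)
    (hL : 28 ≤ PySem.List.pyGetD (MA f) m 0) :
    pvLoopA (PySem.List.pyGetD (MA f) m 0).toNat (MA f) 1 m y =
      if m = 12 then (MA (pvFeb (y + 1)), 1, 1, y + 1) else (MA f, 1, m + 1, y) := by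
  have hsplit : (PySem.List.pyGetD (MA f) m 0).toNat
      = (PySem.List.pyGetD (MA f) m 0 - 1).toNat + 1 := by omega
  rw [hsplit, pvLoopA_add,
    pvLoopA_stay f y m hm (PySem.List.pyGetD (MA f) m 0 - 1).toNat 1 (by omega)]
  have hday : (1 : Int) + ((PySem.List.pyGetD (MA f) m 0 - 1).toNat : Int)
      = PySem.List.pyGetD (MA f) m 0 := by omega
  rw [hday]
  simp only [pvLoopA]
  split_ifs <;> first
    | (exfalso; omega)
    | simp [pvSetFeb_MA]

theorem pvMain : ∀ (k : Nat) (y m : Int), 1 ≤ m → m ≤ 12 →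
    pvFmtState (pvLoopA k (MA (pvFeb y)) 1 m y) = pvLoopB (k : Int) y m := by
  intro k
  induction k using Nat.strong_induction_on with
  | _ k ih =>
    intro y m h1 h2
    rw [pvLoopB]
    by_cases hlt : (k : Int) < pvMonthLen y m
    · rw [dif_pos hlt]
      rw [pvLoopA_stay (pvFeb y) y m h2 k 1
        (by rw [← pvMonthLen_eq y m h1 h2]; omega)]
      show pvFmt y m (1 + (k : Int)) = pvFmt y m ((k : Int) + 1)
      rw [Int.add_comm]
    · rw [dif_neg hlt]
      have h28 := pvMonthLen_ge y m
      obtain ⟨j, hj⟩ : ∃ j : Nat, k = (pvMonthLen y m).toNat + j :=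
        ⟨k - (pvMonthLen y m).toNat, by omega⟩
      have hjlt : j < k := by omega
      have hjval : (j : Int) = (k : Int) - pvMonthLen y m := by omega
      have hcross : pvLoopA ((pvMonthLen y m).toNat) (MA (pvFeb y)) 1 m y =
          if m = 12 then (MA (pvFeb (y + 1)), 1, 1, y + 1) else (MA (pvFeb y), 1, m + 1, y) := by
        rw [show (pvMonthLen y m).toNat = (PySem.List.pyGetD (MA (pvFeb y)) m 0).toNat by
              rw [← pvMonthLen_eq y m h1 h2]]
        exact pvLoopA_cross (pvFeb y) y m h2 (by rw [← pvMonthLen_eq y m h1 h2]; omega)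
      have key : pvFmtState (pvLoopA k (MA (pvFeb y)) 1 m y) =
          pvFmtState ((fun s => pvLoopA j s.1 s.2.1 s.2.2.1 s.2.2.2)
            (if m = 12 then (MA (pvFeb (y + 1)), 1, 1, y + 1) else (MA (pvFeb y), 1, m + 1, y))) := by
        conv_lhs => rw [hj]
        rw [pvLoopA_add, hcross]
      rw [key]
      by_cases h12 : m = 12
      · subst h12
        rw [if_pos rfl]
        have hrec := ih j hjlt (y + 1) 1 (by omega) (by omega)
        simp only at hrec ⊢
        rw [hrec, hjval]
        norm_num
      · rw [if_neg h12]
        have hrec := ih j hjlt y (m + 1) (by omega) (by omega)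
        simp only at hrec ⊢
        rw [hrec, hjval]
        have hno : ¬ m + 1 > 12 := by omega
        rw [if_neg hno]

-- ===== VERDICT (by name: the statement is the Claim_ definition above) =====
theorem DateFromWordleNum_spec : Claim_equal_DateFromWordleNum := by
  intro g _
  unfold Spec_DateFromWordleNum DateFromWordleNum DateFromWordleNum_alt
  by_cases hpos : g > 0
  · simp only [if_pos hpos]
    by_cases h11 : g ≤ 11
    · rw [if_pos h11]
      have harr : ([0,31,28,31,30,31,30,31,31,30,31,30,31,30,31] : List Int) = MA 28 := rfl
      rw [harr, pvLoopA_stay 28 2021 6 (by omega) g.toNat 19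
        (by show (19 : Int) + g.toNat ≤ 30; omega)]
      show pvFmt 2021 6 (19 + (g.toNat : Int)) = pvFmt 2021 6 (19 + g)
      congr 1
      omega
    · rw [if_neg h11]
      have hk : g.toNat = 12 + (g.toNat - 12) := by omega
      have harr : ([0,31,28,31,30,31,30,31,31,30,31,30,31,30,31] : List Int)
          = MA (pvFeb 2021) := rfl
      rw [harr, hk, pvLoopA_add]
      have h12 : pvLoopA 12 (MA (pvFeb 2021)) 19 6 2021 = (MA (pvFeb 2021), 1, 7, 2021) := by
        decide
      rw [h12]
      have hrec := pvMain (g.toNat - 12) 2021 7 (by omega) (by omega)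
      unfold pvFmtState at hrec
      simp only at hrec ⊢
      rw [hrec]
      have : ((g.toNat - 12 : Nat) : Int) = g - 12 := by omega
      rw [this]
  · simp only [if_neg hpos]
    have h0 : g.toNat = 0 := by omega
    rw [h0]
    norm_num [pvLoopA]
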